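-- pv_equiv track=rewrite | github.com/xmco/parse_ntds | scripts/ntds_entries/ntds_trust.py | find_keys_sum
-- ===== SOURCE A (Python) =====
-- def find_keys_sum(d, target, partial=[], used_keys=[]):
--     if target in d: # If the value is a key, return it
--         return [target]
--     s = sum(partial)
--     # if the sum of the keys is equal to the target value, return the list of the keys
--     if s == target:
--         return partial
--     if s >= target:
--         return None # no solution
--
--     # for each key in the dict, check if it has already been used
--     # if not, compute the sum of the keys added with this key
--     # call the func recursively to check if the sum is equal to the target value
--     for key in d:
--         if key not in used_keys:
--             remaining = d[key]
--             n = find_keys_sum(d, target, partial + [key], used_keys + [key])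
--             if n:
--                 return n
-- ===== SOURCE B (Python) =====
-- def find_keys_sum(d, target, partial=[], used_keys=[]):
--     if target in d:  # a single key equal to the target wins immediately (invariant under recursion)
--         return [target]
--     keys = list(d)
--     failed = set()  # memo of (sum, frozenset-of-used-keys) states known to have no solution
--
--     def dfs(s, part, fs):
--         if s == target:
--             return part
--         if s >= target or (s, fs) in failed:
--             return None
--         for k in keys:
--             if k not in fs:
--                 n = dfs(s + k, part + [k], fs | {k})
--                 if n:
--                     return n
--         failed.add((s, fs))
--         return None
--
--     return dfs(sum(partial), list(partial), frozenset(used_keys))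
-- ===== Notes on version B (the rewrite author's own statement) =====
-- stated objective: faster
-- what changed: A blindly recurses over all permutations of unused keys; B runs the same first-success DFS but carries the running sum and the used-key frozenset and memoizes failed (sum, used-key-set) states, so each key subset is explored at most once instead of once per permutation.
import Mathlib
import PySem

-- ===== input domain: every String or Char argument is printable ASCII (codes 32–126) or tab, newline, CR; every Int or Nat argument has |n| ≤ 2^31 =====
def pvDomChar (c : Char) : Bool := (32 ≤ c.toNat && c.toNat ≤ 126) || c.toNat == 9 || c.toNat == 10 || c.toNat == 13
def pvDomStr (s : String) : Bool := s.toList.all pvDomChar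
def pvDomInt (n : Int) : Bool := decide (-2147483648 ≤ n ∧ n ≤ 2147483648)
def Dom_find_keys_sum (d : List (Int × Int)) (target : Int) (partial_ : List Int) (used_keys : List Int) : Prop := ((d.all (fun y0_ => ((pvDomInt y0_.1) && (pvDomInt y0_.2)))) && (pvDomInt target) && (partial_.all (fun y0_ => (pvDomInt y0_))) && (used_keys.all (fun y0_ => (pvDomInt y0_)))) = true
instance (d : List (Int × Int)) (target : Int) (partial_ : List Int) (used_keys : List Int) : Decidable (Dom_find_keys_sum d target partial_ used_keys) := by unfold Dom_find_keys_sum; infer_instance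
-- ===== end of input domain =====

-- B replaces A's blind permutation recursion by a DFS that memoizes failed (sum, used-key-set)
-- states (objective: faster — the memo collapses the permutation tree to subsets).

-- ===== PORT A =====
-- sum(partial)
def pySum (l : List Int) : Int := l.foldl (· + ·) 0

-- Python truthiness of the recursive result: `if n:` (None and [] are falsy)
def truthy : Option (List Int) → Bool
  | some (_ :: _) => true
  | _ => false

-- `for key in d: if key not in used_keys: … n = recurse(...); if n: return n`
def loopA (dd : PySem.Dict Int Int) (next : List Int → List Int → Option (List Int)) :
    List Int → List Int → List Int → Option (List Int)
  | [], _, _ => none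
  | k :: ks, partial_, used_keys =>
    if used_keys.contains k then loopA dd next ks partial_ used_keys
    else
      let _remaining := PySem.Dict.get? dd k   -- `remaining = d[key]` (bound but unused in A)
      let n := next (partial_ ++ [k]) (used_keys ++ [k])
      if truthy n then n else loopA dd next ks partial_ used_keys

-- one level of A's recursion; fuel bounds the recursion depth (each level uses up one unused key)
def levelA (dd : PySem.Dict Int Int) (target : Int) : Nat → List Int → List Int → Option (List Int)
  | 0, _, _ => none
  | fuel + 1, partial_, used_keys =>
    if (PySem.Dict.get? dd target).isSome then some [target]
    else
      let s := pySum partial_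
      if s = target then some partial_
      else if target ≤ s then none
      else loopA dd (levelA dd target fuel) dd.keys partial_ used_keys

def find_keys_sum (d : List (Int × Int)) (target : Int) (partial_ : List Int) (used_keys : List Int) : Option (List Int) :=
  levelA (PySem.Dict.ofList d) target ((PySem.Dict.ofList d).keys.length + 1) partial_ used_keys

-- ===== PORT B =====
-- frozenset equality
def eqSet (a b : List Int) : Bool := a.all (b.contains ·) && b.all (a.contains ·)

-- `(s, fs) in failed`
def memoHas (m : List (Int × List Int)) (s : Int) (fs : List Int) : Bool :=
  m.any (fun e => e.1 == s && eqSet fs e.2)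

-- `for k in keys: if k not in fs: n = dfs(s + k, part + [k], fs | {k}); if n: return n`
def loopB (next : Int → List Int → List Int → List (Int × List Int) → Option (List Int) × List (Int × List Int)) :
    List Int → Int → List Int → List Int → List (Int × List Int) → Option (List Int) × List (Int × List Int)
  | [], _, _, _, m => (none, m)
  | k :: ks, s, part, fs, m =>
    if fs.contains k then loopB next ks s part fs m
    else
      let r := next (s + k) (part ++ [k]) (PySem.Set.add fs k) m
      if truthy r.1 then r else loopB next ks s part fs r.2

-- `dfs(s, part, fs)`, threading the memo `failed`; same fuel convention as A's port
def levelB (keys : List Int) (target : Int) : Nat → Int → List Int → List Int → List (Int × List Int) → Option (List Int) × List (Int × List Int)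
  | 0, _, _, _, m => (none, m)
  | fuel + 1, s, part, fs, m =>
    if s = target then (some part, m)
    else if target ≤ s || memoHas m s fs then (none, m)
    else
      let r := loopB (levelB keys target fuel) keys s part fs m
      if truthy r.1 then r else (none, (s, fs) :: r.2)   -- fell through the loop: failed.add((s, fs))

def find_keys_sum_alt (d : List (Int × Int)) (target : Int) (partial_ : List Int) (used_keys : List Int) : Option (List Int) :=
  let dd := PySem.Dict.ofList d
  if (PySem.Dict.get? dd target).isSome then some [target]
  else
    (levelB dd.keys target (dd.keys.length + 1) (pySum partial_) partial_ (PySem.Set.ofList used_keys) []).1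

-- ===== PRECONDITION & SPEC =====
def Spec_find_keys_sum (d : List (Int × Int)) (target : Int) (partial_ : List Int) (used_keys : List Int) (out : Option (List Int)) : Prop := out = find_keys_sum_alt d target partial_ used_keys
instance (d : List (Int × Int)) (target : Int) (partial_ : List Int) (used_keys : List Int) (out : Option (List Int)) : Decidable (Spec_find_keys_sum d target partial_ used_keys out) := by unfold Spec_find_keys_sum; infer_instance

-- ===== CLAIM (what is proved, stated in full; the proofs are below) =====
def Claim_equal_find_keys_sum : Prop := ∀ (d : List (Int × Int)) (target : Int) (partial_ : List Int) (used_keys : List Int), Dom_find_keys_sum d target partial_ used_keys → Spec_find_keys_sum d target partial_ used_keys (find_keys_sum d target partial_ used_keys)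

-- ===== LEMMAS AND PROOFS =====

-- number of keys of dd not yet used: bounds the remaining recursion depth
def unusedCnt (dd : PySem.Dict Int Int) (u : List Int) : Nat :=
  (dd.keys.filter (fun k => !u.contains k)).length

-- a memo entry (s, fs) is sound: every state with sum s whose used keys match fs fails in A
def FailedSt (dd : PySem.Dict Int Int) (target : Int) (e : Int × List Int) : Prop :=
  ∀ p u f, pySum p = e.1 → (∀ k ∈ dd.keys, u.contains k = e.2.contains k) →
    unusedCnt dd u + 1 ≤ f → levelA dd target f p u = none

theorem pySum_append_singleton (p : List Int) (k : Int) : pySum (p ++ [k]) = pySum p + k := by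
  simp [pySum]

theorem contains_congr (a b : List Int) (x : Int) (h : x ∈ a ↔ x ∈ b) :
    a.contains x = b.contains x := by
  rw [Bool.eq_iff_iff, List.contains_iff_mem, List.contains_iff_mem]
  exact h

theorem contains_append_singleton (u : List Int) (k x : Int) :
    (u ++ [k]).contains x = (u.contains x || (x == k)) := by
  rw [Bool.eq_iff_iff]
  simp

theorem unusedCnt_append_lt (dd : PySem.Dict Int Int) (u : List Int) (k : Int)
    (hk : k ∈ dd.keys) (hu : u.contains k = false) :
    unusedCnt dd (u ++ [k]) < unusedCnt dd u := by
  unfold unusedCnt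
  have hcong : dd.keys.filter (fun x => !(u ++ [k]).contains x)
      = (dd.keys.filter (fun x => !u.contains x)).filter (fun x => !(x == k)) := by
    rw [List.filter_filter]
    refine List.filter_congr (fun x hx => ?_)
    rw [contains_append_singleton]
    cases hxk : (x == k) <;> cases hux : u.contains x <;> simp
  rw [hcong]
  refine (List.length_filter_lt_length_iff_exists).2 ?_
  refine ⟨k, ?_, by simp⟩
  rw [List.mem_filter]
  exact ⟨hk, by simp only [hu, Bool.not_false]⟩

theorem not_truthy_eq_none (r : Option (List Int)) (h : truthy r = false) (h2 : r ≠ some []) :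
    r = none := by
  match r with
  | none => rfl
  | some [] => exact absurd rfl h2
  | some (x :: l) => simp [truthy] at h

theorem truthy_none : truthy none = false := rfl

theorem loopA_shape (dd : PySem.Dict Int Int) (next : List Int → List Int → Option (List Int)) :
    ∀ ks p u, loopA dd next ks p u ≠ some [] := by
  intro ks
  induction ks with
  | nil => intro p u; simp [loopA]
  | cons k ks ih =>
    intro p u
    simp only [loopA]
    split
    · exact ih p u
    · cases hn : next (p ++ [k]) (u ++ [k]) with
      | none => simp [truthy]; exact ih p u
      | some l =>
        cases l with
        | nil => simp [truthy]; exact ih p u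
        | cons x t => simp [truthy]

theorem levelA_ne_some_nil (dd : PySem.Dict Int Int) (target : Int)
    (hT : PySem.Dict.get? dd target = none) :
    ∀ f p u, p ≠ [] → levelA dd target f p u ≠ some [] := by
  intro f p u hp
  cases f with
  | zero => simp [levelA]
  | succ f =>
    simp only [levelA, hT, Option.isSome_none, Bool.false_eq_true, if_false]
    split
    · simpa using hp
    · split
      · simp
      · exact loopA_shape dd _ dd.keys p u

theorem loopA_none_congr (dd : PySem.Dict Int Int) (target : Int)
    (hT : PySem.Dict.get? dd target = none) (g h : Nat)
    (IH : ∀ p1 p2 u1 u2, pySum p1 = pySum p2 →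
      (∀ k ∈ dd.keys, u1.contains k = u2.contains k) →
      unusedCnt dd u1 + 1 ≤ g → unusedCnt dd u2 + 1 ≤ h →
      levelA dd target g p1 u1 = none → levelA dd target h p2 u2 = none) :
    ∀ ks, (∀ k ∈ ks, k ∈ dd.keys) →
    ∀ p1 p2 u1 u2, pySum p1 = pySum p2 →
      (∀ k ∈ dd.keys, u1.contains k = u2.contains k) →
      unusedCnt dd u1 ≤ g → unusedCnt dd u2 ≤ h →
      loopA dd (levelA dd target g) ks p1 u1 = none →
      loopA dd (levelA dd target h) ks p2 u2 = none := by
  intro ks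
  induction ks with
  | nil => intro _ p1 p2 u1 u2 _ _ _ _ _; simp [loopA]
  | cons k ks ihks =>
    intro hks p1 p2 u1 u2 hsum hcompat hb1 hb2 hnone
    have hkk : k ∈ dd.keys := hks k (List.mem_cons_self)
    have htail : ∀ x ∈ ks, x ∈ dd.keys := fun x hx => hks x (List.mem_cons_of_mem _ hx)
    have hc2 := (hcompat k hkk).symm
    cases hc1 : u1.contains k with
    | true =>
      rw [hc1] at hc2
      simp only [loopA, hc1, hc2, if_true] at hnone ⊢
      exact ihks htail p1 p2 u1 u2 hsum hcompat hb1 hb2 hnone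
    | false =>
      rw [hc1] at hc2
      simp only [loopA, hc1, hc2, Bool.false_eq_true, if_false] at hnone ⊢
      -- child results
      have hp1ne : p1 ++ [k] ≠ ([] : List Int) := by simp
      have hone : levelA dd target g (p1 ++ [k]) (u1 ++ [k]) = none := by
        by_cases ht : truthy (levelA dd target g (p1 ++ [k]) (u1 ++ [k])) = true
        · rw [if_pos ht] at hnone
          rw [hnone] at ht
          simp [truthy] at ht
        · exact not_truthy_eq_none _ (Bool.not_eq_true _ ▸ eq_false_of_ne_true ht)
            (levelA_ne_some_nil dd target hT g _ _ hp1ne)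
      have hsum' : pySum (p1 ++ [k]) = pySum (p2 ++ [k]) := by
        rw [pySum_append_singleton, pySum_append_singleton, hsum]
      have hcompat' : ∀ x ∈ dd.keys, (u1 ++ [k]).contains x = (u2 ++ [k]).contains x := by
        intro x hx
        rw [contains_append_singleton, contains_append_singleton, hcompat x hx]
      have hlt1 := unusedCnt_append_lt dd u1 k hkk hc1
      have hlt2 := unusedCnt_append_lt dd u2 k hkk hc2
      have htwo : levelA dd target h (p2 ++ [k]) (u2 ++ [k]) = none :=
        IH (p1 ++ [k]) (p2 ++ [k]) (u1 ++ [k]) (u2 ++ [k]) hsum' hcompat'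
          (by omega) (by omega) hone
      rw [hone, truthy_none] at hnone
      rw [if_neg (by simp) ] at hnone
      rw [htwo, truthy_none, if_neg (by simp)]
      exact ihks htail p1 p2 u1 u2 hsum hcompat hb1 hb2 hnone

theorem levelA_none_congr (dd : PySem.Dict Int Int) (target : Int)
    (hT : PySem.Dict.get? dd target = none) :
    ∀ f1 f2 p1 p2 u1 u2, pySum p1 = pySum p2 →
      (∀ k ∈ dd.keys, u1.contains k = u2.contains k) →
      unusedCnt dd u1 + 1 ≤ f1 → unusedCnt dd u2 + 1 ≤ f2 →
      levelA dd target f1 p1 u1 = none → levelA dd target f2 p2 u2 = none := by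
  intro f1
  induction f1 with
  | zero => intro f2 p1 p2 u1 u2 _ _ hb1 _ _; omega
  | succ f1 ih =>
    intro f2 p1 p2 u1 u2 hsum hcompat hb1 hb2 hnone
    cases f2 with
    | zero => omega
    | succ f2 =>
      simp only [levelA, hT, Option.isSome_none, Bool.false_eq_true, if_false] at hnone ⊢
      by_cases h1 : pySum p1 = target
      · rw [if_pos h1] at hnone; exact absurd hnone (by simp)
      · rw [if_neg h1] at hnone
        rw [if_neg (hsum ▸ h1)]
        by_cases h2 : target ≤ pySum p1
        · rw [if_pos (hsum ▸ h2)]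
        · rw [if_neg h2] at hnone
          rw [if_neg (hsum ▸ h2)]
          exact loopA_none_congr dd target hT f1 f2
            (fun q1 q2 v1 v2 a b c d e => ih f2 q1 q2 v1 v2 a b c d e)
            dd.keys (fun x hx => hx) p1 p2 u1 u2 hsum hcompat (by omega) (by omega) hnone

theorem memoHas_elim (m : List (Int × List Int)) (s : Int) (fs : List Int)
    (h : memoHas m s fs = true) :
    ∃ e ∈ m, e.1 = s ∧ ∀ x : Int, x ∈ fs ↔ x ∈ e.2 := by
  rcases List.any_eq_true.1 h with ⟨e, hem, he⟩
  rcases Bool.and_eq_true_iff.1 he with ⟨h1, h2⟩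
  refine ⟨e, hem, by simpa using h1, ?_⟩
  rcases Bool.and_eq_true_iff.1 h2 with ⟨ha, hb⟩
  intro x
  constructor
  · intro hx
    have := List.all_eq_true.1 ha x hx
    exact List.contains_iff_mem.1 this
  · intro hx
    have := List.all_eq_true.1 hb x hx
    exact List.contains_iff_mem.1 this

theorem loopB_eq_loopA (dd : PySem.Dict Int Int) (target : Int) (g : Nat)
    (IH : ∀ p u s fs m, pySum p = s →
      (∀ k ∈ dd.keys, u.contains k = fs.contains k) →
      unusedCnt dd u + 1 ≤ g → (∀ e ∈ m, FailedSt dd target e) →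
      (levelB dd.keys target g s p fs m).1 = levelA dd target g p u
      ∧ ∀ e ∈ (levelB dd.keys target g s p fs m).2, FailedSt dd target e) :
    ∀ ks, (∀ k ∈ ks, k ∈ dd.keys) →
    ∀ p u s fs m, pySum p = s →
      (∀ k ∈ dd.keys, u.contains k = fs.contains k) →
      unusedCnt dd u ≤ g → (∀ e ∈ m, FailedSt dd target e) →
      (loopB (levelB dd.keys target g) ks s p fs m).1 = loopA dd (levelA dd target g) ks p u
      ∧ ∀ e ∈ (loopB (levelB dd.keys target g) ks s p fs m).2, FailedSt dd target e := by
  intro ks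
  induction ks with
  | nil => intro _ p u s fs m _ _ _ hm; exact ⟨by simp [loopA, loopB], by simpa [loopB] using hm⟩
  | cons k ks ihks =>
    intro hks p u s fs m hsum hcompat hb hm
    have hkk : k ∈ dd.keys := hks k (List.mem_cons_self)
    have htail : ∀ x ∈ ks, x ∈ dd.keys := fun x hx => hks x (List.mem_cons_of_mem _ hx)
    have hceq := hcompat k hkk
    cases hc1 : u.contains k with
    | true =>
      rw [hc1] at hceq
      simp only [loopB, loopA, hc1, ← hceq, if_true]
      exact ihks htail p u s fs m hsum hcompat hb hm
    | false =>
      rw [hc1] at hceq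
      simp only [loopB, loopA, hc1, ← hceq, Bool.false_eq_true, if_false]
      have hcompat' : ∀ x ∈ dd.keys, (u ++ [k]).contains x = (PySem.Set.add fs k).contains x := by
        intro x hx
        have hmem : x ∈ u ↔ x ∈ fs := by
          rw [← List.contains_iff_mem, ← List.contains_iff_mem, hcompat x hx]
        have hadd : x ∈ PySem.Set.add fs k ↔ x ∈ fs ∨ x = k := by
          simp [PySem.Set.mem_add]
        rw [contains_append_singleton, Bool.eq_iff_iff]
        simp only [Bool.or_eq_true, List.contains_iff_mem, beq_iff_eq]
        have hc : (PySem.Set.add fs k).contains x = true ↔ x ∈ PySem.Set.add fs k := by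
          simp [PySem.Set.contains]
        rw [hc, hadd]
        tauto
      have hsum' : pySum (p ++ [k]) = s + k := by rw [pySum_append_singleton, hsum]
      have hlt := unusedCnt_append_lt dd u k hkk hc1
      obtain ⟨hr1, hrm⟩ := IH (p ++ [k]) (u ++ [k]) (s + k) (PySem.Set.add fs k) m hsum'
        hcompat' (by omega) hm
      rw [← hr1]
      cases ht : truthy (levelB dd.keys target g (s + k) (p ++ [k]) (PySem.Set.add fs k) m).1 with
      | true =>
        exact ⟨by simp, hrm⟩
      | false =>
        simp only [if_neg (show ¬ (false = true) by simp)]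
        exact ihks htail p u s fs
          (levelB dd.keys target g (s + k) (p ++ [k]) (PySem.Set.add fs k) m).2 hsum hcompat hb hrm

theorem levelB_eq_levelA (dd : PySem.Dict Int Int) (target : Int)
    (hT : PySem.Dict.get? dd target = none) :
    ∀ fuel p u s fs m, pySum p = s →
      (∀ k ∈ dd.keys, u.contains k = fs.contains k) →
      unusedCnt dd u + 1 ≤ fuel →
      (∀ e ∈ m, FailedSt dd target e) →
      (levelB dd.keys target fuel s p fs m).1 = levelA dd target fuel p u
      ∧ ∀ e ∈ (levelB dd.keys target fuel s p fs m).2, FailedSt dd target e := by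
  intro fuel
  induction fuel with
  | zero => intro p u s fs m _ _ hb _; omega
  | succ fuel ih =>
    intro p u s fs m hsum hcompat hb hm
    by_cases h1 : s = target
    · have hA : levelA dd target (fuel + 1) p u = some p := by
        simp only [levelA, hT, Option.isSome_none, Bool.false_eq_true, if_false]
        rw [hsum, if_pos h1]
      have hB : levelB dd.keys target (fuel + 1) s p fs m = (some p, m) := by
        simp only [levelB]
        rw [if_pos h1]
      rw [hA, hB]
      exact ⟨rfl, hm⟩
    · cases hle : decide (target ≤ s) with
      | true =>
        have hle' : target ≤ s := of_decide_eq_true hle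
        have hA : levelA dd target (fuel + 1) p u = none := by
          simp only [levelA, hT, Option.isSome_none, Bool.false_eq_true, if_false]
          rw [hsum, if_neg h1, if_pos hle']
        have hB : levelB dd.keys target (fuel + 1) s p fs m = (none, m) := by
          simp only [levelB]
          rw [if_neg h1, if_pos (by simp [hle])]
        rw [hA, hB]
        exact ⟨rfl, hm⟩
      | false =>
        have hle' : ¬ target ≤ s := of_decide_eq_false hle
        cases hmh : memoHas m s fs with
        | true =>
          have hA : levelA dd target (fuel + 1) p u = none := by
            rcases memoHas_elim m s fs hmh with ⟨e, hem, he1, he2⟩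
            refine hm e hem p u (fuel + 1) (by rw [hsum, he1]) ?_ (by omega)
            intro x hx
            rw [hcompat x hx]
            refine contains_congr _ _ x ?_
            exact he2 x
          have hB : levelB dd.keys target (fuel + 1) s p fs m = (none, m) := by
            simp only [levelB]
            rw [if_neg h1, if_pos (by simp [hmh])]
          rw [hA, hB]
          exact ⟨rfl, hm⟩
        | false =>
          obtain ⟨hr1, hrm⟩ := loopB_eq_loopA dd target fuel ih dd.keys (fun x hx => hx)
            p u s fs m hsum hcompat (by omega) hm
          have hAun : levelA dd target (fuel + 1) p u
              = loopA dd (levelA dd target fuel) dd.keys p u := by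
            simp only [levelA, hT, Option.isSome_none, Bool.false_eq_true, if_false]
            rw [hsum, if_neg h1, if_neg hle']
          have hBun : levelB dd.keys target (fuel + 1) s p fs m
              = (let r := loopB (levelB dd.keys target fuel) dd.keys s p fs m;
                 if truthy r.1 then r else (none, (s, fs) :: r.2)) := by
            simp only [levelB]
            rw [if_neg h1, if_neg (by simp [hle, hmh])]
          cases ht : truthy (loopB (levelB dd.keys target fuel) dd.keys s p fs m).1 with
          | true =>
            rw [hAun, hBun]
            simp only [ht, if_true]
            exact ⟨hr1, hrm⟩
          | false =>
            have hA : levelA dd target (fuel + 1) p u = none := by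
              rw [hAun, ← hr1]
              exact not_truthy_eq_none _ ht (hr1 ▸ loopA_shape dd _ dd.keys p u)
            constructor
            · rw [hA, hBun]
              simp only [ht, Bool.false_eq_true, if_false]
            · rw [hBun]
              simp only [ht, Bool.false_eq_true, if_false]
              intro e hem
              rcases List.mem_cons.1 hem with he | he
              · subst he
                intro p' u' f' hs' hcmp' hf'
                refine levelA_none_congr dd target hT (fuel + 1) f' p p' u u'
                  (by rw [hsum, hs']) ?_ (by omega) hf' hA
                intro x hx
                exact (hcompat x hx).trans (hcmp' x hx).symm
              · exact hrm e he

-- ===== VERDICT (by name: the statement is the Claim_ definition above) =====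
theorem find_keys_sum_spec : Claim_equal_find_keys_sum := by
  unfold Claim_equal_find_keys_sum
  intro d target p u _
  unfold Spec_find_keys_sum find_keys_sum find_keys_sum_alt
  cases hT : PySem.Dict.get? (PySem.Dict.ofList d) target with
  | some v => simp [levelA, hT]
  | none =>
    simp only [hT, Option.isSome_none, Bool.false_eq_true, if_false]
    have hcompat : ∀ k ∈ (PySem.Dict.ofList d).keys,
        u.contains k = (PySem.Set.ofList u).contains k := by
      intro k _
      exact contains_congr _ _ k (PySem.Set.mem_ofList u k).symm
    have hb : unusedCnt (PySem.Dict.ofList d) u + 1 ≤ (PySem.Dict.ofList d).keys.length + 1 := by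
      have := List.length_filter_le (fun k => !u.contains k) (PySem.Dict.ofList d).keys
      unfold unusedCnt
      omega
    exact (levelB_eq_levelA (PySem.Dict.ofList d) target hT
      ((PySem.Dict.ofList d).keys.length + 1) p u (pySum p) (PySem.Set.ofList u) []
      rfl hcompat hb (by simp)).1.symm
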